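-- pv_equiv track=rewrite | github.com/IrronRoman19/python-exercises | basics2/practice/loop-17.py | sum_the_series
-- ===== SOURCE A (Python) =====
-- def sum_the_series(num):
--     first_num = 1
--     seria = "2"
--     res = 0
--     for i in range(first_num, (num + 1)):
--         int_seria = seria * i
--         int_seria = int(int_seria)
--         res += int_seria
--
--     return res
-- ===== SOURCE B (Python) =====
-- def sum_the_series(num):
--     # closed form: sum_{i=1..num} int("2"*i) = 2 * (10**(num+1) - 10 - 9*num) / 81
--     if num < 1:
--         return 0
--     return 2 * (10 ** (num + 1) - 10 - 9 * num) // 81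
-- ===== Notes on version B (the rewrite author's own statement) =====
-- stated objective: faster
-- what changed: replaced the loop that builds and parses the digit string '2'*i for every i by the exact closed form 2*(10**(num+1)-10-9*num)//81 computed with one integer power
import Mathlib
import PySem

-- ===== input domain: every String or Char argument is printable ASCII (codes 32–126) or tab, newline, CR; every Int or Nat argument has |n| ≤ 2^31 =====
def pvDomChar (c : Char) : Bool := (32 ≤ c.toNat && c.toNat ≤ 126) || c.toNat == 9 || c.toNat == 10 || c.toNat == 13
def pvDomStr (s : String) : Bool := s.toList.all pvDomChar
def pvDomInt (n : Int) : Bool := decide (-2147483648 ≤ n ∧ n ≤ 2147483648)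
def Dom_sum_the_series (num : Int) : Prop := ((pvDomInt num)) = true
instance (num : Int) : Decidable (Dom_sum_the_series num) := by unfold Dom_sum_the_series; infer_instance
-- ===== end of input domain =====

-- B replaces A's loop (build "2"*i, parse it, add) by the exact closed form
-- 2*(10^(num+1) - 10 - 9*num) // 81; objective: faster (one power instead of a quadratic loop).


-- ===== PORT A =====
-- hand port of Python's int(s): exact on the nonempty all-decimal-digit strings "2"*i
-- (the only strings A ever parses; no sign/whitespace/underscore occurs there)
def pvDigitsToInt (cs : List Char) : Int :=
  cs.foldl (fun a c => 10 * a + ((c.toNat : Int) - 48)) 0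

def sum_the_series (num : Int) : Int :=
  (PySem.List.pyRange 1 (num + 1) 1).foldl
    (fun res i =>
      let int_seria := List.replicate i.toNat '2'   -- seria * i  (str * int; i ≥ 1 in the range, so .toNat is exact)
      let v := pvDigitsToInt int_seria              -- int(int_seria)
      res + v) 0

-- ===== PORT B =====
def sum_the_series_alt (num : Int) : Int :=
  if num < 1 then 0
  else PySem.Int.floordiv (2 * (10 ^ (num + 1).toNat - 10 - 9 * num)) 81

-- ===== PRECONDITION & SPEC =====
def Spec_sum_the_series (num : Int) (out : Int) : Prop := out = sum_the_series_alt num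
instance (num : Int) (out : Int) : Decidable (Spec_sum_the_series num out) := by unfold Spec_sum_the_series; infer_instance

-- ===== CLAIM (what is proved, stated in full; the proofs are below) =====
def Claim_equal_sum_the_series : Prop := ∀ (num : Int), Dom_sum_the_series num → Spec_sum_the_series num (sum_the_series num)

-- ===== LEMMAS AND PROOFS =====

-- parsing k twos from accumulator a: 9 * result = 9*a*10^k + 2*(10^k - 1)
theorem pv_nine_mul_foldl_twos (k : Nat) :
    ∀ a : Int, 9 * (List.replicate k '2').foldl (fun a c => 10 * a + ((c.toNat : Int) - 48)) a
      = 9 * a * 10 ^ k + 2 * (10 ^ k - 1) := by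
  induction k with
  | zero => intro a; simp
  | succ k ih =>
      intro a
      rw [List.replicate_succ, List.foldl_cons, ih]
      have : ((('2').toNat : Int) - 48) = 2 := by decide
      rw [this]
      ring

theorem pv_nine_mul_twos (k : Nat) :
    9 * pvDigitsToInt (List.replicate k '2') = 2 * (10 ^ k - 1) := by
  unfold pvDigitsToInt
  have := pv_nine_mul_foldl_twos k 0
  simpa using this

-- the loop over range 1..n as a fold over List.range n
theorem pv_loop_closed (n : Nat) :
    81 * ((List.range n).map (fun k : Nat => (1 : Int) + (k : Int))).foldl
        (fun res i => res + pvDigitsToInt (List.replicate i.toNat '2')) 0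
      = 2 * (10 ^ (n + 1) - 10 - 9 * n) := by
  induction n with
  | zero => simp
  | succ n ih =>
      rw [List.range_succ, List.map_append, List.foldl_append]
      simp only [List.map_cons, List.map_nil, List.foldl_cons, List.foldl_nil]
      have htn : ((1 : Int) + (n : Int)).toNat = n + 1 := by omega
      rw [mul_add, ih, htn]
      have h2 := pv_nine_mul_twos (n + 1)
      have hp : (10 : Int) ^ (n + 1 + 1) = 10 ^ (n + 1) * 10 := pow_succ _ _
      push_cast
      rw [hp]
      linarith [h2]

theorem pv_A_closed (num : Int) (h : 1 ≤ num) :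
    81 * sum_the_series num = 2 * (10 ^ (num + 1).toNat - 10 - 9 * num) := by
  unfold sum_the_series
  rw [PySem.List.pyRange_one]
  have h1 : (num + 1 - 1).toNat = num.toNat := by omega
  rw [h1]
  have h2 := pv_loop_closed num.toNat
  have h3 : (num.toNat : Int) = num := by omega
  have h4 : (num + 1).toNat = num.toNat + 1 := by omega
  rw [h3] at h2
  rw [h4]
  simpa using h2

-- ===== VERDICT (by name: the statement is the Claim_ definition above) =====
theorem sum_the_series_spec : Claim_equal_sum_the_series := by
  intro num _
  unfold Spec_sum_the_series sum_the_series_alt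
  by_cases h : num < 1
  · -- empty range: the fold is over an empty list
    simp only [if_pos h]
    unfold sum_the_series
    rw [PySem.List.pyRange_one]
    have h1 : (num + 1 - 1).toNat = 0 := by omega
    rw [h1]
    simp
  · simp only [if_neg h]
    have h1 : (1 : Int) ≤ num := by omega
    have hc := pv_A_closed num h1
    rw [PySem.Int.floordiv_eq_ediv_of_pos (by norm_num)]
    rw [← hc, Int.mul_ediv_cancel_left _ (by norm_num)]
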